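-- pv_equiv track=rewrite | github.com/yuukun123/Python | PyLearn/Learn/Dictionaries/encryptionListToDic.py | encryptiionListToDic
-- ===== SOURCE A (Python) =====
-- def encryptiionListToDic(n):
--     if not n:
--         return None
--
--     m = {}  # Dictionary để lưu mã hóa
--     encoded_list = []  # Danh sách đã mã hóa
--     count = 0  # Biến đếm để gán số
--
--     for word in n:
--         if word not in m:
--             m[word] = count
--             count += 1
--         encoded_list.append(m[word])  # Thêm giá trị m[word] vào danh sách
--
--     return m, encoded_list
-- ===== SOURCE B (Python) =====
-- def encryptiionListToDic(n):
--     if not n: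
--         return None
--     # record each word's FIRST occurrence index: walk back-to-front, later (earlier) writes win
--     first = {}
--     for i, w in reversed(list(enumerate(n))):
--         first[w] = i
--     # the codes are the ranks of the first-occurrence indices
--     order = sorted(first, key=first.get)
--     m = {w: c for c, w in enumerate(order)}
--     return m, [m[w] for w in n]
-- ===== Notes on version B (the rewrite author's own statement) =====
-- stated objective: alternative
-- what changed: Instead of A's online pass with a membership test and a running counter, B records each word's first-occurrence index by a backward overwrite pass, sorts the distinct words by that index, and assigns codes as sort ranks before a separate encoding pass.
import Mathlib
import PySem

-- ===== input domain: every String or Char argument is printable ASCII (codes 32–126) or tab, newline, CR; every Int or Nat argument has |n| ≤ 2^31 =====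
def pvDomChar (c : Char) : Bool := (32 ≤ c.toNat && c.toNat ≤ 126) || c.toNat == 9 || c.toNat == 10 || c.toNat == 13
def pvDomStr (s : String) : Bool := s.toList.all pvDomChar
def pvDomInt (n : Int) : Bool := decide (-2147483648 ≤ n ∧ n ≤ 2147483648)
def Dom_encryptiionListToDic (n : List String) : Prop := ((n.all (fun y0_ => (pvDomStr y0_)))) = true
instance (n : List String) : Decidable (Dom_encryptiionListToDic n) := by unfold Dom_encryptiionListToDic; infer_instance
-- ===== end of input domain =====

-- B replaces A's online pass (membership test + running counter) by a sort-based algorithm: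
-- a backward overwrite pass records each word's first-occurrence index, the distinct words are
-- sorted by that index, codes are the sort ranks, and a separate pass encodes the list.
-- Objective: alternative (same results, different algorithm).

-- ===== PORT A =====
def encryptiionListToDic (n : List String) : Option ((List (String × Int)) × List Int) :=
  if n = [] then none
  else
    let s := n.foldl
      (fun (st : PySem.Dict String Int × List Int × Int) word =>
        let m := if st.1.contains word then st.1 else st.1.insert word st.2.2
        let count := if st.1.contains word then st.2.2 else st.2.2 + 1
        -- encoded_list.append(m[word]): the key is always present here (just inserted if missing)
        (m, st.2.1 ++ [m.getD word 0], count))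
      (PySem.Dict.empty, ([] : List Int), (0 : Int))
    some (s.1.items, s.2.1)

-- ===== PORT B =====
def encryptiionListToDic_alt (n : List String) : Option ((List (String × Int)) × List Int) :=
  if n = [] then none
  else
    -- for i, w in reversed(list(enumerate(n))): first[w] = i
    let first := (PySem.List.enumerate n).reverse.foldl
      (fun d p => d.insert p.2 p.1) (PySem.Dict.empty : PySem.Dict String Int)
    -- order = sorted(first, key=first.get)   (iterating a dict iterates its keys; all keys present)
    let order := PySem.List.sorted first.keys (fun w => first.getD w 0) false
    -- m = {w: c for c, w in enumerate(order)}
    let m := (PySem.List.enumerate order).foldl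
      (fun d p => d.insert p.2 p.1) (PySem.Dict.empty : PySem.Dict String Int)
    -- [m[w] for w in n]: every w ∈ n is a key of m
    some (m.items, n.map (fun w => m.getD w 0))

-- ===== PRECONDITION & SPEC =====
def Spec_encryptiionListToDic (n : List String) (out : Option ((List (String × Int)) × List Int)) : Prop := out = encryptiionListToDic_alt n
instance (n : List String) (out : Option ((List (String × Int)) × List Int)) : Decidable (Spec_encryptiionListToDic n out) := by unfold Spec_encryptiionListToDic; infer_instance

-- ===== CLAIM (what is proved, stated in full; the proofs are below) =====
def Claim_equal_encryptiionListToDic : Prop := ∀ (n : List String), Dom_encryptiionListToDic n → Spec_encryptiionListToDic n (encryptiionListToDic n)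

-- ===== LEMMAS AND PROOFS =====

-- the rank dictionary built from a (deduplicated) key list
def pvBd (d : List String) : PySem.Dict String Int :=
  (PySem.List.enumerate d).foldl (fun dd p => dd.insert p.2 p.1) PySem.Dict.empty

-- first-occurrence code of w in the distinct list d (0 if absent)
def pvCode (d : List String) (w : String) : Int :=
  match PySem.List.index? d w with
  | some k => (k : Int)
  | none => 0

-- first-occurrence index of w in p (0 if absent)
def pvFidx (p : List String) (w : String) : Nat :=
  (PySem.List.index? p w).getD 0

theorem pvBd_append (d : List String) (x : String) :
    pvBd (d ++ [x]) = (pvBd d).insert x (d.length : Int) := by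
  simp [pvBd, PySem.List.enumerate_append, List.foldl_append, PySem.List.enumerate]

theorem pvCode_none {d : List String} {w : String} (h : w ∉ d) : pvCode d w = 0 := by
  simp [pvCode, PySem.List.index?_eq_idxOf?, List.idxOf?_eq_none_iff.mpr h]

theorem pvCode_append_of_mem {d : List String} (t : List String) {w : String} (h : w ∈ d) :
    pvCode (d ++ t) w = pvCode d w := by
  simp only [pvCode]
  rw [PySem.List.index?_append_of_mem t h]

theorem pvBd_char (d : List String) (hd : d.Nodup) :
    (pvBd d).keys = d ∧ ∀ w, (pvBd d).getD w 0 = pvCode d w := by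
  induction d using List.reverseRecOn with
  | nil =>
    refine ⟨by simp [pvBd, PySem.List.enumerate, PySem.Dict.keys_empty], fun w => ?_⟩
    simp [pvBd, PySem.List.enumerate, PySem.Dict.getD_empty, pvCode, PySem.List.index?]
  | append_singleton d x ih =>
    have h := List.nodup_append.mp hd
    have hnd : d.Nodup := h.1
    have hx : x ∉ d := fun hm => (h.2.2 x hm x (by simp)) rfl
    obtain ⟨hk, hg⟩ := ih hnd
    have hcont : (pvBd d).contains x = false := by
      rw [PySem.Dict.contains_eq_decide_mem_keys, hk]; simp [hx]
    constructor
    · rw [pvBd_append, PySem.Dict.keys_insert_of_not_contains _ _ hcont, hk]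
    · intro w
      rw [pvBd_append, PySem.Dict.getD_insert]
      by_cases hwx : w = x
      · subst hwx
        rw [if_pos rfl]
        simp only [pvCode]
        rw [PySem.List.index?_append_singleton_self _ _ hx]
      · rw [if_neg hwx, hg w]
        by_cases hwd : w ∈ d
        · exact (pvCode_append_of_mem [x] hwd).symm
        · rw [pvCode_none hwd, pvCode_none (by simp [hwd, hwx])]

theorem pvDedup_append (p : List String) (x : String) :
    PySem.List.dedup (p ++ [x]) =
      if x ∈ PySem.List.dedup p then PySem.List.dedup p else PySem.List.dedup p ++ [x] := by
  simp only [PySem.List.dedup, PySem.Set.ofList_eq_foldl, List.foldl_append, List.foldl_cons,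
    List.foldl_nil]
  rw [← PySem.Set.ofList_eq_foldl]
  simp [PySem.Set.add, PySem.Set.contains]

-- A's loop, characterised
theorem pvLoop (p : List String) :
    p.foldl
      (fun (st : PySem.Dict String Int × List Int × Int) word =>
        let m := if st.1.contains word then st.1 else st.1.insert word st.2.2
        let count := if st.1.contains word then st.2.2 else st.2.2 + 1
        (m, st.2.1 ++ [m.getD word 0], count))
      (PySem.Dict.empty, ([] : List Int), (0 : Int)) =
    (pvBd (PySem.List.dedup p),
     p.map (pvCode (PySem.List.dedup p)),
     ((PySem.List.dedup p).length : Int)) := by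
  induction p using List.reverseRecOn with
  | nil => simp [pvBd, PySem.List.dedup, PySem.Set.ofList]
  | append_singleton p x ih =>
    set d := PySem.List.dedup p with hd
    have hnd : d.Nodup := PySem.List.nodup_dedup p
    obtain ⟨hk, hg⟩ := pvBd_char d hnd
    rw [List.foldl_append, ih]
    simp only [List.foldl_cons, List.foldl_nil]
    have hcont : (pvBd d).contains x = decide (x ∈ d) := by
      rw [PySem.Dict.contains_eq_decide_mem_keys, hk]
    by_cases hmem : x ∈ d
    · rw [pvDedup_append, ← hd, if_pos hmem]
      simp [hcont, hmem, hg x]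
    · rw [pvDedup_append, ← hd, if_neg hmem]
      have hnd' : (d ++ [x]).Nodup := by
        rw [List.nodup_append]
        exact ⟨hnd, List.nodup_singleton x,
          fun a ha b hb => by simp at hb; exact fun hab => hmem ((hab.trans hb) ▸ ha)⟩
      obtain ⟨_, hg'⟩ := pvBd_char (d ++ [x]) hnd'
      have hins : (pvBd d).insert x (d.length : Int) = pvBd (d ++ [x]) :=
        (pvBd_append d x).symm
      have hmap : p.map (pvCode d) = p.map (pvCode (d ++ [x])) := by
        apply List.map_congr_left
        intro u hu
        have hud : u ∈ d := by rw [hd, PySem.List.mem_dedup]; exact hu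
        exact (pvCode_append_of_mem [x] hud).symm
      simp only [hcont, hmem, decide_false, Bool.false_eq_true, if_false, hins]
      refine Prod.ext rfl (Prod.ext ?_ ?_)
      · simp only [List.map_append, List.map_cons, List.map_nil, hmap]
        rw [hg' x]
      · simp

-- B's backward pass: the surviving (last-written, i.e. smallest) value is the first-occurrence index
theorem pvFirst_getD (n : List String) : ∀ (s : Int) (d0 : PySem.Dict String Int) (w : String) (dflt : Int),
    ((PySem.List.enumerate n s).reverse.foldl (fun d p => d.insert p.2 p.1) d0).getD w dflt
      = match PySem.List.index? n w with
        | some k => s + k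
        | none => d0.getD w dflt := by
  induction n with
  | nil =>
    intro s d0 w dflt
    simp [PySem.List.enumerate_nil, PySem.List.index?]
  | cons x xs ih =>
    intro s d0 w dflt
    rw [PySem.List.enumerate_cons, List.reverse_cons, List.foldl_append]
    simp only [List.foldl_cons, List.foldl_nil]
    rw [PySem.Dict.getD_insert]
    by_cases hwx : w = x
    · subst hwx
      rw [if_pos rfl, PySem.List.index?_cons_self]
      simp
    · rw [if_neg hwx, ih (s + 1) d0 w dflt,
        PySem.List.index?_cons_of_ne xs (fun h => hwx h.symm)]
      cases h : PySem.List.index? xs w with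
      | none => simp
      | some k => simp; ring

-- keys of B's backward pass: the distinct words (in reverse-first-insertion order)
theorem pvFirst_keys (n : List String) :
    ((PySem.List.enumerate n).reverse.foldl (fun d p => d.insert p.2 p.1)
        (PySem.Dict.empty : PySem.Dict String Int)).keys
      = PySem.Set.ofList n.reverse := by
  have h := PySem.Dict.keys_foldl_insert_key (ν := Int)
    (PySem.List.enumerate n).reverse (fun p => p.2) (fun d p => p.1) PySem.Dict.empty
  simp only at h
  rw [h, PySem.Dict.keys_empty, PySem.Set.update_nil_left]
  congr 1
  rw [List.map_reverse, PySem.List.map_snd_enumerate]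

-- B's key values on words of n are the first-occurrence indices
theorem pvKey_eq (n : List String) {w : String} (hw : w ∈ n) :
    ((PySem.List.enumerate n).reverse.foldl (fun d p => d.insert p.2 p.1)
        (PySem.Dict.empty : PySem.Dict String Int)).getD w 0 = (pvFidx n w : Int) := by
  rw [pvFirst_getD]
  cases h : PySem.List.index? n w with
  | none => exact absurd ((PySem.List.index?_eq_none_iff _ _).mp h) (by simpa using hw)
  | some k => simp only [pvFidx]; rw [h]; simp

-- dedup lists its elements in order of strictly increasing first-occurrence index
theorem pvDedup_pairwise (p : List String) :
    (PySem.List.dedup p).Pairwise (fun a b => pvFidx p a < pvFidx p b) := by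
  induction p using List.reverseRecOn with
  | nil => simp [PySem.List.dedup, PySem.Set.ofList]
  | append_singleton p x ih =>
    have hfix : ∀ a ∈ p, pvFidx (p ++ [x]) a = pvFidx p a := by
      intro a ha
      simp only [pvFidx]
      rw [PySem.List.index?_append_of_mem [x] ha]
    by_cases hmem : x ∈ PySem.List.dedup p
    · rw [pvDedup_append, if_pos hmem]
      refine ih.imp_of_mem ?_
      intro a b ha hb hlt
      have ha' : a ∈ p := (PySem.List.mem_dedup _ _).mp ha
      have hb' : b ∈ p := (PySem.List.mem_dedup _ _).mp hb
      rw [hfix a ha', hfix b hb']; exact hlt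
    · rw [pvDedup_append, if_neg hmem]
      have hxp : x ∉ p := fun h => hmem ((PySem.List.mem_dedup _ _).mpr h)
      rw [List.pairwise_append]
      refine ⟨ih.imp_of_mem ?_, List.pairwise_singleton _ _, ?_⟩
      · intro a b ha hb hlt
        have ha' : a ∈ p := (PySem.List.mem_dedup _ _).mp ha
        have hb' : b ∈ p := (PySem.List.mem_dedup _ _).mp hb
        rw [hfix a ha', hfix b hb']; exact hlt
      · intro a ha b hb
        rw [List.mem_singleton] at hb
        have ha' : a ∈ p := (PySem.List.mem_dedup _ _).mp ha
        have hxi : pvFidx (p ++ [x]) x = p.length := by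
          simp only [pvFidx]
          rw [PySem.List.index?_append_singleton_self _ _ hxp]; rfl
        rw [hb, hfix a ha', hxi]
        obtain ⟨k, hk⟩ := Option.isSome_iff_exists.mp ((PySem.List.index?_isSome_iff _ _).mpr ha')
        obtain ⟨hlt, _⟩ := PySem.List.getElem_of_index?_eq_some hk
        simp only [pvFidx]
        rw [hk]
        exact hlt

-- the sort in B recovers exactly the first-appearance (dedup) order
theorem pvOrder (n : List String) :
    PySem.List.sorted
      ((PySem.List.enumerate n).reverse.foldl (fun d p => d.insert p.2 p.1)
        (PySem.Dict.empty : PySem.Dict String Int)).keys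
      (fun w => ((PySem.List.enumerate n).reverse.foldl (fun d p => d.insert p.2 p.1)
        (PySem.Dict.empty : PySem.Dict String Int)).getD w 0) false
    = PySem.List.dedup n := by
  apply PySem.List.sorted_eq_of_perm_of_pairwise_lt
  · rw [pvFirst_keys]
    refine (List.perm_ext_iff_of_nodup (PySem.List.nodup_dedup n)
      (PySem.Set.nodup_ofList _)).mpr ?_
    intro a
    rw [PySem.List.mem_dedup, PySem.Set.mem_ofList, List.mem_reverse]
  · refine (pvDedup_pairwise n).imp_of_mem ?_
    intro a b ha hb hlt
    have ha' : a ∈ n := (PySem.List.mem_dedup _ _).mp ha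
    have hb' : b ∈ n := (PySem.List.mem_dedup _ _).mp hb
    rw [pvKey_eq n ha', pvKey_eq n hb']
    exact_mod_cast hlt

-- ===== VERDICT (by name: the statement is the Claim_ definition above) =====
theorem encryptiionListToDic_spec : Claim_equal_encryptiionListToDic := by
  intro n _
  unfold Spec_encryptiionListToDic
  by_cases hn : n = []
  · simp [hn, encryptiionListToDic, encryptiionListToDic_alt]
  · obtain ⟨_, hg⟩ := pvBd_char (PySem.List.dedup n) (PySem.List.nodup_dedup n)
    have hmap : (n.map fun w => (pvBd (PySem.List.dedup n)).getD w 0)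
        = n.map (pvCode (PySem.List.dedup n)) :=
      List.map_congr_left fun w _ => hg w
    simp only [encryptiionListToDic, encryptiionListToDic_alt, if_neg hn]
    rw [pvLoop n, pvOrder n]
    simp only [pvBd] at hmap ⊢
    rw [← hmap]
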